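-- pv_equiv track=rewrite | github.com/alzweidi/land-intel-core | python/landintel/geospatial/hmlr_inspire.py | _slugify_authority_label
-- ===== SOURCE A (Python) =====
-- def _slugify_authority_label(authority_label: str) -> str:
--     return "_".join(
--         token
--         for token in [
--             "".join(character for character in part if character.isalnum())
--             for part in authority_label.replace("-", " ").replace("/", " ").split()
--         ]
--         if token
--     )
-- ===== SOURCE B (Python) =====
-- def _slugify_authority_label(authority_label: str) -> str:
--     tokens = []
--     buf = []
--     for ch in authority_label:
--         if ch.isalnum():
--             buf.append(ch)
--         elif ch.isspace() or ch in "-/":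
--             if buf:
--                 tokens.append("".join(buf))
--                 buf = []
--         # other punctuation: skipped, current word continues
--     if buf:
--         tokens.append("".join(buf))
--     return "_".join(tokens)
-- ===== Notes on version B (the rewrite author's own statement) =====
-- stated objective: simpler
-- what changed: Replaced the replace/replace/split plus nested-comprehension-and-filter pipeline with a single left-to-right state-machine pass that keeps a current-word buffer and flushes it into a token list at separators.
import Mathlib
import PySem

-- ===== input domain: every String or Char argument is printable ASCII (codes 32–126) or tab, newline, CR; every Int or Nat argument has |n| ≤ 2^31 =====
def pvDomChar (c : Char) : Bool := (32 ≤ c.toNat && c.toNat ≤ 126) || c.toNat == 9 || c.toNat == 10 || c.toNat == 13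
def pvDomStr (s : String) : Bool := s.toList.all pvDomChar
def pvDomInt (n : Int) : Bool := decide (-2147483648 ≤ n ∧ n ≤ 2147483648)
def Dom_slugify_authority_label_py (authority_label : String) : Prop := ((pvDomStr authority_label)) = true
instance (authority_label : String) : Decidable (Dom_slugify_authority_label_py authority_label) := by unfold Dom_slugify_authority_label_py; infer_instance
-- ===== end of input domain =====

-- B replaces A's replace/split/nested-comprehension pipeline with one explicit left-to-right
-- state-machine pass (current-word buffer + token list); objective: simpler decomposition, same cost.

-- ===== PORT A =====
-- A: replace '-' and '/' by spaces, whitespace-split, keep the alnum chars of each part, join nonempty tokens with '_'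
def slugify_authority_label_py (authority_label : String) : String :=
  let parts := PySem.Chars.split₀
    (PySem.Chars.replace (PySem.Chars.replace authority_label.toList ['-'] [' ']) ['/'] [' '])
  let toks := parts.map (fun part => part.filter PySem.Chars.isalnum)
  String.ofList (PySem.Chars.join ['_'] (toks.filter (fun t => !t.isEmpty)))

-- ===== PORT B =====
-- separator test of B: whitespace, '-' or '/'
def pvSepB (c : Char) : Bool := PySem.Chars.isspace c || c == '-' || c == '/'

-- loop body of B: alnum chars go into the buffer, a separator flushes a nonempty buffer, other chars are skipped
def pvStep (st : List (List Char) × List Char) (c : Char) : List (List Char) × List Char :=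
  if PySem.Chars.isalnum c then (st.1, st.2 ++ [c])
  else if pvSepB c then (if st.2.isEmpty then st else (st.1 ++ [st.2], ([] : List Char)))
  else st

-- B: one left-to-right pass, then flush the remaining buffer and join with '_'
def slugify_authority_label_py_alt (authority_label : String) : String :=
  let st := authority_label.toList.foldl pvStep ([], [])
  let toks := if st.2.isEmpty then st.1 else st.1 ++ [st.2]
  String.ofList (PySem.Chars.join ['_'] toks)

-- ===== PRECONDITION & SPEC =====
def Spec_slugify_authority_label_py (authority_label : String) (out : String) : Prop := out = slugify_authority_label_py_alt authority_label
instance (authority_label : String) (out : String) : Decidable (Spec_slugify_authority_label_py authority_label out) := by unfold Spec_slugify_authority_label_py; infer_instance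

-- ===== CLAIM (what is proved, stated in full; the proofs are below) =====
def Claim_equal_slugify_authority_label_py : Prop := ∀ (authority_label : String), Dom_slugify_authority_label_py authority_label → Spec_slugify_authority_label_py authority_label (slugify_authority_label_py authority_label)

-- ===== LEMMAS AND PROOFS =====

-- the combined effect of A's two single-character replaces
def pvRepl (c : Char) : Char :=
  if (if c = '-' then ' ' else c) = '/' then ' ' else (if c = '-' then ' ' else c)

-- common specification of the token list, recursing on the input with the current (already filtered) buffer
def pvTokSpec : List Char → List Char → List (List Char)
  | [], buf => if buf.isEmpty then [] else [buf]
  | c :: rest, buf =>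
    if PySem.Chars.isalnum c then pvTokSpec rest (buf ++ [c])
    else if pvSepB c then (if buf.isEmpty then pvTokSpec rest [] else buf :: pvTokSpec rest [])
    else pvTokSpec rest buf

theorem pvReplaceGo_single (a b : Char) :
    ∀ (cs : List Char) (acc : List Char) (fuel : Nat), cs.length ≤ fuel →
      PySem.Chars.replace.go [a] [b] fuel cs acc
        = acc.reverse ++ cs.map (fun c => if c == a then b else c) := by
  intro cs
  induction cs with
  | nil => intro acc fuel _; cases fuel <;> simp [PySem.Chars.replace.go]
  | cons c t ih =>
    intro acc fuel hf
    cases fuel with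
    | zero => simp at hf
    | succ n =>
      simp only [List.length_cons, Nat.succ_le_succ_iff] at hf
      by_cases hc : c = a
      · subst hc
        have hpre : List.isPrefixOf [c] (c :: t) = true := by simp [List.isPrefixOf]
        simp [PySem.Chars.replace.go, hpre, ih _ n hf]
      · have hpre : List.isPrefixOf [a] (c :: t) = false := by
          simp [List.isPrefixOf]; exact fun h => (hc h.symm).elim
        simp [PySem.Chars.replace.go, hpre, hc, ih _ n hf]

theorem pvReplace_single (cs : List Char) (a b : Char) :
    PySem.Chars.replace cs [a] [b] = cs.map (fun c => if c == a then b else c) := by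
  simp [PySem.Chars.replace, pvReplaceGo_single a b cs [] cs.length le_rfl]

theorem pvAlnum_not_space (c : Char) (h : PySem.Chars.isalnum c = true) :
    PySem.Chars.isspace c = false := by
  simp only [PySem.Chars.isalnum, PySem.Chars.isalpha, PySem.Chars.isdigit,
        PySem.Chars.isupper, PySem.Chars.islower, Bool.or_eq_true, Bool.and_eq_true,
        decide_eq_true_eq, Char.le_def, UInt32.le_iff_toNat_le] at h
  simp only [PySem.Chars.isspace, Bool.or_eq_false_iff, Bool.and_eq_false_iff,
        decide_eq_false_iff_not]
  have hc : c.toNat = c.val.toNat := rfl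
  have h1 : 'A'.val.toNat = 65 := rfl
  have h2 : 'Z'.val.toNat = 90 := rfl
  have h3 : 'a'.val.toNat = 97 := rfl
  have h4 : 'z'.val.toNat = 122 := rfl
  have h5 : '0'.val.toNat = 48 := rfl
  have h6 : '9'.val.toNat = 57 := rfl
  omega

theorem pvAlnum_not_sep (c : Char) (h : PySem.Chars.isalnum c = true) : pvSepB c = false := by
  have h1 := pvAlnum_not_space c h
  have h2 : c ≠ '-' := by rintro rfl; simp [PySem.Chars.isalnum, PySem.Chars.isalpha,
    PySem.Chars.isdigit, PySem.Chars.isupper, PySem.Chars.islower] at h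
  have h3 : c ≠ '/' := by rintro rfl; simp [PySem.Chars.isalnum, PySem.Chars.isalpha,
    PySem.Chars.isdigit, PySem.Chars.isupper, PySem.Chars.islower] at h
  simp [pvSepB, h1, h2, h3]

theorem pvRepl_sep (c : Char) (h : pvSepB c = true) :
    PySem.Chars.isspace (pvRepl c) = true := by
  by_cases h1 : c = '-'
  · subst h1; decide
  · by_cases h2 : c = '/'
    · subst h2; decide
    · simp [pvSepB, h1, h2] at h
      simpa [pvRepl, h1, h2] using h

theorem pvRepl_not_sep (c : Char) (h : pvSepB c = false) :
    pvRepl c = c ∧ PySem.Chars.isspace c = false := by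
  simp [pvSepB] at h
  exact ⟨by simp [pvRepl, h.1.2, h.2], h.1.1⟩

-- A's split/filter pipeline after the replaces, expressed against pvTokSpec
theorem pvA_spec (cs : List Char) : ∀ (cur : List Char) (acc : List (List Char)),
    ((PySem.Chars.split₀.go (cs.map pvRepl) cur acc).map
        (fun part => part.filter PySem.Chars.isalnum)).filter (fun t => !t.isEmpty)
      = ((acc.reverse.map (fun part => part.filter PySem.Chars.isalnum)).filter
          (fun t => !t.isEmpty))
        ++ pvTokSpec cs (cur.reverse.filter PySem.Chars.isalnum) := by
  induction cs with
  | nil =>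
    intro cur acc
    by_cases hcur : cur = []
    · subst hcur; simp [PySem.Chars.split₀.go, pvTokSpec]
    · have hce : cur.isEmpty = false := by simp [hcur]
      simp only [List.map_nil, PySem.Chars.split₀.go, hce, Bool.false_eq_true, if_false,
        pvTokSpec, List.reverse_cons, List.map_append, List.filter_append]
      cases hf : (cur.reverse.filter PySem.Chars.isalnum).isEmpty <;>
        simp only [List.map_cons, List.map_nil, List.filter_cons, List.filter_nil, hf,
          Bool.not_false, Bool.not_true, Bool.false_eq_true, if_false, if_true,
          List.append_nil]
  | cons c rest ih =>
    intro cur acc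
    by_cases han : PySem.Chars.isalnum c = true
    · have hns := pvAlnum_not_space c han
      have hsep := pvAlnum_not_sep c han
      have hr : pvRepl c = c := (pvRepl_not_sep c hsep).1
      simp only [List.map_cons, hr, PySem.Chars.split₀.go, hns, Bool.false_eq_true, if_false]
      rw [ih (c :: cur) acc]
      simp [pvTokSpec, han, List.filter_append]
    · by_cases hsep : pvSepB c = true
      · have hsp := pvRepl_sep c hsep
        simp only [List.map_cons, PySem.Chars.split₀.go, hsp, if_true]
        by_cases hcur : cur = []
        · subst hcur
          simp only [List.isEmpty_nil, if_true]
          rw [ih [] acc]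
          simp [pvTokSpec, han, hsep]
        · have hce : cur.isEmpty = false := by simp [hcur]
          simp only [hce, Bool.false_eq_true, if_false]
          rw [ih [] (cur.reverse :: acc)]
          simp only [pvTokSpec, han, hsep, Bool.false_eq_true, if_false, if_true,
            List.reverse_nil, List.filter_nil, List.reverse_cons,
            List.map_append, List.filter_append]
          cases hf : (cur.reverse.filter PySem.Chars.isalnum).isEmpty <;>
            simp only [hf, List.map_cons, List.map_nil, List.filter_cons, List.filter_nil,
              Bool.not_false, Bool.not_true, Bool.false_eq_true, if_false, if_true,
              List.append_assoc, List.singleton_append, List.append_nil]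
      · have hns := pvRepl_not_sep c (by simpa using hsep)
        simp only [List.map_cons, hns.1, PySem.Chars.split₀.go, hns.2, Bool.false_eq_true,
          if_false]
        rw [ih (c :: cur) acc]
        simp [pvTokSpec, han, hsep, List.filter_append]

-- B's fold, expressed against pvTokSpec
theorem pvB_spec (cs : List Char) : ∀ (toks : List (List Char)) (buf : List Char),
    (let st := cs.foldl pvStep (toks, buf)
     if st.2.isEmpty then st.1 else st.1 ++ [st.2])
      = toks ++ pvTokSpec cs buf := by
  induction cs with
  | nil => intro toks buf; by_cases h : buf = [] <;> simp [pvTokSpec, h]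
  | cons c rest ih =>
    intro toks buf
    by_cases han : PySem.Chars.isalnum c = true
    · simpa [pvStep, han, pvTokSpec] using ih toks (buf ++ [c])
    · by_cases hsep : pvSepB c = true
      · by_cases hbuf : buf = []
        · subst hbuf; simpa [pvStep, han, hsep, pvTokSpec] using ih toks []
        · have hbe : buf.isEmpty = false := by simp [hbuf]
          have := ih (toks ++ [buf]) []
          simp only [List.foldl_cons, pvStep, han, hsep, hbe, Bool.false_eq_true, reduceIte]
          simp only at this
          rw [this]
          simp [pvTokSpec, han, hsep, hbe]
      · simpa [pvStep, han, hsep, pvTokSpec] using ih toks buf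

-- ===== VERDICT (by name: the statement is the Claim_ definition above) =====
theorem slugify_authority_label_py_spec : Claim_equal_slugify_authority_label_py := by
  intro s _
  unfold Spec_slugify_authority_label_py slugify_authority_label_py slugify_authority_label_py_alt
  rw [pvReplace_single, pvReplace_single]
  have hmap : (s.toList.map (fun c => if c == '-' then ' ' else c)).map
      (fun c => if c == '/' then ' ' else c) = s.toList.map pvRepl := by
    simp only [List.map_map]
    apply List.map_congr_left
    intro a _
    simp [pvRepl, Function.comp]
  rw [hmap]
  have hA := pvA_spec s.toList [] []
  have hB := pvB_spec s.toList [] []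
  simp only [List.reverse_nil, List.filter_nil, List.map_nil, List.nil_append] at hA hB
  simp only [PySem.Chars.split₀]
  rw [hA, hB]
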